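-- pv_equiv track=rewrite | github.com/SpencerLabAQ/replication-package_performance-test-coverage | data-collection/0E_Chunks_Analysed.py | get_direct_calls_set
-- ===== SOURCE A (Python) =====
-- def get_direct_calls_set(input_array, in_set):
--     output_set = set()
--     skip_flag = False
--     for i in input_array:
--         if skip_flag and i != '#':
--             continue
--         elif i == '#':
--             skip_flag = False
--         elif i in in_set:
--             output_set.add(i)
--             skip_flag = True
--     return output_set
-- ===== SOURCE B (Python) =====
-- def _segments(xs):
--     """Split xs at each '#' delimiter (delimiters dropped, trailing segment kept)."""
--     if '#' in xs:
--         k = xs.index('#')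
--         return [xs[:k]] + _segments(xs[k + 1:])
--     return [xs]
--
--
-- def get_direct_calls_set(input_array, in_set):
--     members = set(in_set)
--     output_set = set()
--     for seg in _segments(input_array):
--         first = next((x for x in seg if x in members), None)
--         if first is not None:
--             output_set.add(first)
--     return output_set
-- ===== Notes on version B (the rewrite author's own statement) =====
-- stated objective: alternative
-- what changed: Replaces the interleaved skip_flag state machine with a partition-then-process shape: recursively split the array into '#'-delimited segments, then add the first in_set match of each segment.
import Mathlib
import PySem

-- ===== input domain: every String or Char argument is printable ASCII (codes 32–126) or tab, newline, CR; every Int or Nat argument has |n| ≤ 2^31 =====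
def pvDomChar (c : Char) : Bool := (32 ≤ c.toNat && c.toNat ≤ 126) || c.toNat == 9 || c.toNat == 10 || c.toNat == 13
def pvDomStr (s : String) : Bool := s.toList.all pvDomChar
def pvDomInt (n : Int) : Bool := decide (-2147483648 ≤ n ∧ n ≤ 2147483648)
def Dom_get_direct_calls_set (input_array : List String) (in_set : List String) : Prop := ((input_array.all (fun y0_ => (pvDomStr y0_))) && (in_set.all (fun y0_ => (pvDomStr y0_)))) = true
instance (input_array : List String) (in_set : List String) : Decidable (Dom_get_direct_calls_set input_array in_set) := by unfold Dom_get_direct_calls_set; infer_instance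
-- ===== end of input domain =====

-- B replaces A's interleaved skip_flag state machine by an explicit
-- partition into '#'-delimited segments followed by a first-match pass
-- (objective: alternative decomposition, same linear cost).

-- ===== PORT A =====
-- one loop step of A: (output_set, skip_flag) updated by token i
def pvStepA (in_set : List String) (st : PySem.Set String × Bool) (i : String) : PySem.Set String × Bool :=
  if st.2 && i != "#" then st
  else if i == "#" then (st.1, false)
  else if in_set.contains i then (PySem.Set.add st.1 i, true)
  else st

def get_direct_calls_set (input_array : List String) (in_set : List String) : List String :=
  (input_array.foldl (pvStepA in_set) (PySem.Set.empty, false)).1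

-- ===== PORT B =====
-- _segments: split at the first '#' (xs[:k] = takeWhile (· != "#"), xs[k+1:] = tail of dropWhile) and recurse
def pvSegments (xs : List String) : List (List String) :=
  if h : "#" ∈ xs then
    (xs.takeWhile (· != "#")) :: pvSegments ((xs.dropWhile (· != "#")).tail)
  else [xs]
termination_by xs.length
decreasing_by
  have hne : xs.dropWhile (· != "#") ≠ [] := by
    intro hnil
    have := (List.dropWhile_eq_nil_iff).1 hnil _ h
    simp at this
  calc (xs.dropWhile (· != "#")).tail.length
      < (xs.dropWhile (· != "#")).length := by
        cases hd : xs.dropWhile (· != "#") with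
        | nil => exact absurd hd hne
        | cons a l => simp
    _ ≤ xs.length := xs.length_dropWhile_le _

-- 'x in members' with members = set(in_set) is the same membership test as x ∈ in_set
def get_direct_calls_set_alt (input_array : List String) (in_set : List String) : List String :=
  (pvSegments input_array).foldl
    (fun out seg =>
      match seg.find? (fun x => in_set.contains x) with
      | some m => PySem.Set.add out m
      | none => out)
    PySem.Set.empty

-- ===== PRECONDITION & SPEC =====
def Spec_get_direct_calls_set (input_array : List String) (in_set : List String) (out : List String) : Prop := out = get_direct_calls_set_alt input_array in_set
instance (input_array : List String) (in_set : List String) (out : List String) : Decidable (Spec_get_direct_calls_set input_array in_set out) := by unfold Spec_get_direct_calls_set; infer_instance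

-- ===== CLAIM (what is proved, stated in full; the proofs are below) =====
def Claim_equal_get_direct_calls_set : Prop := ∀ (input_array : List String) (in_set : List String), Dom_get_direct_calls_set input_array in_set → Spec_get_direct_calls_set input_array in_set (get_direct_calls_set input_array in_set)

-- ===== LEMMAS AND PROOFS =====

-- the second pass of B, named for the proofs
def pvStepB (in_set : List String) (out : PySem.Set String) (seg : List String) : PySem.Set String :=
  match seg.find? (fun x => in_set.contains x) with
  | some m => PySem.Set.add out m
  | none => out

theorem stepA_hash (in_set : List String) (st : PySem.Set String × Bool) :
    pvStepA in_set st "#" = (st.1, false) := by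
  cases st with
  | mk σ b => cases b <;> simp [pvStepA]

-- with skip_flag set, a '#'-free run changes nothing
theorem foldA_skip (in_set : List String) (xs : List String) (σ : PySem.Set String)
    (h : "#" ∉ xs) :
    xs.foldl (pvStepA in_set) (σ, true) = (σ, true) := by
  induction xs with
  | nil => rfl
  | cons x xs ih =>
    have hx : x ≠ "#" := by intro hx; exact h (by simp [hx])
    have : pvStepA in_set (σ, true) x = (σ, true) := by
      simp [pvStepA, hx]
    rw [List.foldl_cons, this, ih (by intro hm; exact h (by simp [hm]))]

-- with skip_flag clear, a '#'-free run adds exactly the first in_set match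
theorem foldA_noHash (in_set : List String) (xs : List String) (σ : PySem.Set String)
    (h : "#" ∉ xs) :
    xs.foldl (pvStepA in_set) (σ, false) =
      match xs.find? (fun x => in_set.contains x) with
      | some m => (PySem.Set.add σ m, true)
      | none => (σ, false) := by
  induction xs generalizing σ with
  | nil => rfl
  | cons x xs ih =>
    have hx : x ≠ "#" := by intro hx; exact h (by simp [hx])
    have hxs : "#" ∉ xs := by intro hm; exact h (by simp [hm])
    by_cases hc : x ∈ in_set
    · have hcb : in_set.contains x = true := by simpa using hc
      have : pvStepA in_set (σ, false) x = (PySem.Set.add σ x, true) := by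
        simp [pvStepA, hx, hc]
      rw [List.foldl_cons, this, foldA_skip in_set xs _ hxs, List.find?_cons_of_pos hcb]
    · have hcb : ¬ in_set.contains x = true := by simpa using hc
      have : pvStepA in_set (σ, false) x = (σ, false) := by
        simp [pvStepA, hx, hc]
      rw [List.foldl_cons, this, ih _ hxs, List.find?_cons_of_neg hcb]

-- decomposition of a list containing '#'
theorem hash_decomp (xs : List String) (h : "#" ∈ xs) :
    xs = xs.takeWhile (· != "#") ++ "#" :: (xs.dropWhile (· != "#")).tail := by
  have hne : xs.dropWhile (· != "#") ≠ [] := by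
    intro hnil
    have := (List.dropWhile_eq_nil_iff).1 hnil _ h
    simp at this
  have hhead : (xs.dropWhile (· != "#")).head hne = "#" := by
    have := xs.head_dropWhile_not (p := (· != "#")) hne
    simpa using this
  have hcons : xs.dropWhile (· != "#") = "#" :: (xs.dropWhile (· != "#")).tail := by
    conv_lhs => rw [← List.cons_head_tail hne]
    rw [hhead]
  conv_lhs => rw [← xs.takeWhile_append_dropWhile (p := (· != "#")), hcons]

theorem mainLemma (in_set : List String) :
    ∀ n (xs : List String), xs.length ≤ n → ∀ σ : PySem.Set String,
      (xs.foldl (pvStepA in_set) (σ, false)).1 =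
        (pvSegments xs).foldl (pvStepB in_set) σ := by
  intro n
  induction n with
  | zero =>
    intro xs hlen σ
    have : xs = [] := List.length_eq_zero_iff.1 (Nat.le_zero.1 hlen)
    subst this
    simp [pvSegments, pvStepB]
  | succ n ih =>
    intro xs hlen σ
    by_cases h : "#" ∈ xs
    · set t := xs.takeWhile (· != "#") with ht
      set r := (xs.dropWhile (· != "#")).tail with hr
      have hdc : xs = t ++ "#" :: r := hash_decomp xs h
      have hnoT : "#" ∉ t := by
        intro hm
        have := List.mem_takeWhile_imp (l := xs) (p := (· != "#")) (by rw [← ht]; exact hm)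
        simp at this
      have hrlen : r.length ≤ n := by
        have : xs.length = t.length + 1 + r.length := by
          rw [hdc]; simp; omega
        omega
      have hsegs : pvSegments xs = t :: pvSegments r := by
        rw [pvSegments, dif_pos h]
      rw [hsegs, hdc, List.foldl_append, List.foldl_cons, foldA_noHash in_set t σ hnoT]
      cases hf : t.find? (fun x => in_set.contains x) with
      | some m =>
        rw [stepA_hash, ih r hrlen, List.foldl_cons]
        have : pvStepB in_set σ t = PySem.Set.add σ m := by simp only [pvStepB]; rw [hf]
        rw [this]
      | none =>
        rw [stepA_hash, ih r hrlen, List.foldl_cons]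
        have : pvStepB in_set σ t = σ := by simp only [pvStepB]; rw [hf]
        rw [this]
    · have hsegs : pvSegments xs = [xs] := by rw [pvSegments, dif_neg h]
      rw [hsegs, foldA_noHash in_set xs σ h]
      simp only [List.foldl_cons, List.foldl_nil, pvStepB]
      cases hf : xs.find? (fun x => in_set.contains x) <;> rfl

-- ===== VERDICT (by name: the statement is the Claim_ definition above) =====
theorem get_direct_calls_set_spec : Claim_equal_get_direct_calls_set := by
  intro input_array in_set _
  unfold Spec_get_direct_calls_set get_direct_calls_set get_direct_calls_set_alt
  have := mainLemma in_set input_array.length input_array le_rfl PySem.Set.empty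
  rw [this]
  rfl
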